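-- pv_equiv track=rewrite | github.com/jonasRower/FemTheory_generator | Python/pridejVyraz.py | zjistiPocetSloupcuTabulky
-- ===== SOURCE A (Python) =====
-- def zjistiPocetSloupcuTabulky(obsahTabulky):
--
--     pocetSloupcu = -1
--
--     for i in range(len(obsahTabulky)):
--         i1 = len(obsahTabulky) - i - 1
--         obsahSloupce = obsahTabulky[i1]
--
--         if (obsahSloupce != ''):
--             pocetSloupcu = i1 + 1
--             break
--
--     return (pocetSloupcu)
-- ===== SOURCE B (Python) =====
-- def zjistiPocetSloupcuTabulky(obsahTabulky):
--     hits = [i for i, s in enumerate(obsahTabulky) if s != '']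
--     return hits[-1] + 1 if hits else -1
-- ===== Notes on version B (the rewrite author's own statement) =====
-- stated objective: simpler
-- what changed: Replaced the backward index-arithmetic scan with early break by a forward comprehension collecting all non-empty indices and returning the last one + 1 (or -1 if none).
import Mathlib
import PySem

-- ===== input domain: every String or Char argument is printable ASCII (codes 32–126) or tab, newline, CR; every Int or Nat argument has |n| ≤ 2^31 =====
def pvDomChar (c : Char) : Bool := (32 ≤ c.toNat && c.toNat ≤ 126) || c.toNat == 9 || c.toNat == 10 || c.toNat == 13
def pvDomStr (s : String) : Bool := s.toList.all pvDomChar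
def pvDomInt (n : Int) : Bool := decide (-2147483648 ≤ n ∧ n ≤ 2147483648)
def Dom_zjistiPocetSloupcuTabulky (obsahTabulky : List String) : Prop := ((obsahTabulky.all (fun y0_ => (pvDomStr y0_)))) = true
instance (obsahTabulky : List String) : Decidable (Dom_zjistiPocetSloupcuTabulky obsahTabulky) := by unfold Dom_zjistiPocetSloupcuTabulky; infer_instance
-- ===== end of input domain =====

-- B replaces A's backward early-break scan by a forward pass collecting the indices of
-- non-empty columns and taking the last one (+1), -1 if none; objective: simpler.


-- ===== PORT A =====
-- A's loop: for i in range(len), look at index i1 = len-i-1, break on the first non-empty.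
def zjistiAuxA (obsahTabulky : List String) (i : Nat) : Int :=
  if _h : i < obsahTabulky.length then
    let i1 := obsahTabulky.length - i - 1
    match PySem.List.pyGet? obsahTabulky (i1 : Int) with
    | some obsahSloupce =>
        if obsahSloupce ≠ "" then (i1 : Int) + 1 else zjistiAuxA obsahTabulky (i + 1)
    | none => -1  -- unreachable: i1 < length, so pyGet? always returns some
  else -1
termination_by obsahTabulky.length - i

def zjistiPocetSloupcuTabulky (obsahTabulky : List String) : Int :=
  zjistiAuxA obsahTabulky 0

-- ===== PORT B =====
-- hits = [i for i, s in enumerate(obsahTabulky) if s != '']; hits[-1] + 1 if hits else -1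
def zjistiPocetSloupcuTabulky_alt (obsahTabulky : List String) : Int :=
  let hits := ((PySem.List.enumerate obsahTabulky 0).filter (fun p => p.2 ≠ "")).map (fun p => p.1)
  match hits.getLast? with
  | some i => i + 1
  | none => -1

-- ===== PRECONDITION & SPEC =====
def Spec_zjistiPocetSloupcuTabulky (obsahTabulky : List String) (out : Int) : Prop := out = zjistiPocetSloupcuTabulky_alt obsahTabulky
instance (obsahTabulky : List String) (out : Int) : Decidable (Spec_zjistiPocetSloupcuTabulky obsahTabulky out) := by unfold Spec_zjistiPocetSloupcuTabulky; infer_instance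

-- ===== CLAIM (what is proved, stated in full; the proofs are below) =====
def Claim_equal_zjistiPocetSloupcuTabulky : Prop := ∀ (obsahTabulky : List String), Dom_zjistiPocetSloupcuTabulky obsahTabulky → Spec_zjistiPocetSloupcuTabulky obsahTabulky (zjistiPocetSloupcuTabulky obsahTabulky)

-- ===== LEMMAS AND PROOFS =====

-- Appending an element on the right shifts A's loop counter by one.
theorem zjistiAuxA_shift (xs : List String) (a : String) :
    ∀ i, zjistiAuxA (xs ++ [a]) (i + 1) = zjistiAuxA xs i := by
  intro i
  induction hn : xs.length - i using Nat.strong_induction_on generalizing i with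
  | _ n ih =>
    unfold zjistiAuxA
    by_cases h : i < xs.length
    · have h' : i + 1 < (xs ++ [a]).length := by simp; omega
      have hidx : (xs ++ [a]).length - (i + 1) - 1 = xs.length - i - 1 := by
        simp only [List.length_append, List.length_cons, List.length_nil]; omega
      have hlt : xs.length - i - 1 < xs.length := by omega
      have hget : PySem.List.pyGet? (xs ++ [a]) ((xs.length - i - 1 : Nat) : Int)
          = PySem.List.pyGet? xs ((xs.length - i - 1 : Nat) : Int) := by
        simp [PySem.List.pyGet?_natCast, List.getElem?_append_left hlt]
      simp only [h', h, dif_pos, hidx, hget]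
      cases hg : PySem.List.pyGet? xs ((xs.length - i - 1 : Nat) : Int) with
      | none => rfl
      | some s =>
        by_cases hs : s = ""
        · simp only [hs, ne_eq, not_true_eq_false, if_false]
          exact ih (xs.length - (i + 1)) (by omega) (i + 1) rfl
        · simp [hs]
    · have h' : ¬ (i + 1 < (xs ++ [a]).length) := by
        simp only [List.length_append, List.length_cons, List.length_nil]; omega
      simp [h]

theorem portA_snoc (xs : List String) (a : String) :
    zjistiPocetSloupcuTabulky (xs ++ [a])
      = if a ≠ "" then (xs.length : Int) + 1 else zjistiPocetSloupcuTabulky xs := by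
  unfold zjistiPocetSloupcuTabulky
  rw [zjistiAuxA]
  have h : 0 < (xs ++ [a]).length := by simp
  have hidx : (xs ++ [a]).length - 0 - 1 = xs.length := by simp
  have hget : PySem.List.pyGet? (xs ++ [a]) ((xs.length : Nat) : Int) = some a := by
    simp
  simp only [h, dif_pos, hidx, hget]
  by_cases hs : a = ""
  · simp only [hs, ne_eq, not_true_eq_false, if_false]
    exact zjistiAuxA_shift xs "" 0
  · simp [hs]

theorem portB_snoc (xs : List String) (a : String) :
    zjistiPocetSloupcuTabulky_alt (xs ++ [a])
      = if a ≠ "" then (xs.length : Int) + 1 else zjistiPocetSloupcuTabulky_alt xs := by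
  unfold zjistiPocetSloupcuTabulky_alt
  rw [PySem.List.enumerate_append]
  simp only [PySem.List.enumerate_cons, PySem.List.enumerate_nil, List.filter_append, List.map_append]
  by_cases hs : a = ""
  · simp [hs]
  · simp [hs, List.getLast?_append]

theorem zjisti_eq (xs : List String) :
    zjistiPocetSloupcuTabulky xs = zjistiPocetSloupcuTabulky_alt xs := by
  induction xs using List.reverseRecOn with
  | nil =>
    rw [zjistiPocetSloupcuTabulky, zjistiAuxA]
    simp [zjistiPocetSloupcuTabulky_alt, PySem.List.enumerate_nil]
  | append_singleton xs a ih =>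
    rw [portA_snoc, portB_snoc]
    by_cases hs : a = "" <;> simp [hs, ih]

-- ===== VERDICT (by name: the statement is the Claim_ definition above) =====
theorem zjistiPocetSloupcuTabulky_spec : Claim_equal_zjistiPocetSloupcuTabulky := by
  intro xs _
  unfold Spec_zjistiPocetSloupcuTabulky
  exact zjisti_eq xs
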